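-- pv_equiv track=rewrite | github.com/Obito-2/yingzaofashi_rag_backend | scripts/build_retriever_experiment_dataset.py | _group_ids_by_book
-- ===== SOURCE A (Python) =====
-- from collections import defaultdict
-- from typing import Any
--
-- def _group_ids_by_book(
--     rows: list[dict[str, Any]], id_key: str
-- ) -> dict[str, list[str]]:
--     by_book: dict[str, list[str]] = defaultdict(list)
--     for r in rows:
--         bid = r.get("book_id")
--         if not bid:
--             continue
--         by_book[str(bid)].append(str(r[id_key]))
--     return dict(by_book)
-- ===== SOURCE B (Python) =====
-- def _group_ids_by_book(rows, id_key):
--     kept = [r for r in rows if r.get("book_id")]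
--     keys = list(dict.fromkeys(str(r["book_id"]) for r in kept))
--     return {
--         k: [str(r[id_key]) for r in kept if str(r["book_id"]) == k]
--         for k in keys
--     }
-- ===== Notes on version B (the rewrite author's own statement) =====
-- stated objective: alternative
-- what changed: Replaces the single-pass defaultdict accumulation with a filter + ordered key dedup (dict.fromkeys) followed by one per-key scan building each group as a comprehension.
import Mathlib
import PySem

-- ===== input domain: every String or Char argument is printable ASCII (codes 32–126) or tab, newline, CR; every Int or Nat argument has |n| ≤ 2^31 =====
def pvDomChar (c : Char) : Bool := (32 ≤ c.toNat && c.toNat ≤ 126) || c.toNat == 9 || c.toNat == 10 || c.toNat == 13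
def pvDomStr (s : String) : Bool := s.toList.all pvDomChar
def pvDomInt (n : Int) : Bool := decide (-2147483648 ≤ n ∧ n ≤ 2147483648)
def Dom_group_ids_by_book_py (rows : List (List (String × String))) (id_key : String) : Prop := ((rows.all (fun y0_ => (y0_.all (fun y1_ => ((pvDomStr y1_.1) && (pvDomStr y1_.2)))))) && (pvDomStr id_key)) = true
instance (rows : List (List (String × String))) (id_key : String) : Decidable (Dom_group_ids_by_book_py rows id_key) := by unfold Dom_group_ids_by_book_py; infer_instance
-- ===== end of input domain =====

-- B replaces A's one-pass defaultdict accumulation with filter + ordered key dedup + one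
-- per-key scan building each group (objective: alternative decomposition, same results).

-- ===== PORT A =====
-- single pass: for each row, skip falsy book_id, else append str(r[id_key]) to by_book[str(bid)]
def group_ids_by_book_py (rows : List (List (String × String))) (id_key : String) : List (String × List String) :=
  (rows.foldl
    (fun d r =>
      match (PySem.Dict.mk r).get? "book_id" with
      | none => d
      | some bid =>
        if bid = "" then d
        else d.modify bid [] (fun ids => ids ++ [((PySem.Dict.mk r).get? id_key).getD ""]))
    (PySem.Dict.empty : PySem.Dict String (List String))).items

-- ===== PORT B =====
-- r.get("book_id") with "" for missing; "" is exactly the falsy case (values are strings)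
def pvBid (r : List (String × String)) : String := ((PySem.Dict.mk r).get? "book_id").getD ""
-- r[id_key]; total under Pre_ (the key is present wherever this is consumed)
def pvIdv (r : List (String × String)) (id_key : String) : String := ((PySem.Dict.mk r).get? id_key).getD ""

def group_ids_by_book_py_alt (rows : List (List (String × String))) (id_key : String) : List (String × List String) :=
  let kept := rows.filter (fun r => decide (pvBid r ≠ ""))
  let keys := PySem.List.dedup (kept.map pvBid)
  keys.map (fun k => (k, (kept.filter (fun r => pvBid r == k)).map (fun r => pvIdv r id_key)))

-- ===== PRECONDITION & SPEC =====
-- Pre_ excludes exactly the inputs where Python A raises KeyError: a row whose book_id is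
-- truthy but which lacks id_key (B raises there too).
def Pre_group_ids_by_book_py (rows : List (List (String × String))) (id_key : String) : Prop :=
  ∀ r ∈ rows, pvBid r ≠ "" → ((PySem.Dict.mk r).get? id_key).isSome
instance (rows : List (List (String × String))) (id_key : String) : Decidable (Pre_group_ids_by_book_py rows id_key) := by unfold Pre_group_ids_by_book_py; infer_instance

def pvWitness_group_ids_by_book_py : (List (List (String × String))) × String :=
  ([[("book_id", "b1"), ("id", "7")], [("book_id", ""), ("x", "0")], [("book_id", "b1"), ("id", "8")]], "id")

def Spec_group_ids_by_book_py (rows : List (List (String × String))) (id_key : String) (out : List (String × List String)) : Prop := out = group_ids_by_book_py_alt rows id_key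
instance (rows : List (List (String × String))) (id_key : String) (out : List (String × List String)) : Decidable (Spec_group_ids_by_book_py rows id_key out) := by unfold Spec_group_ids_by_book_py; infer_instance

-- ===== CLAIM (what is proved, stated in full; the proofs are below) =====
def Claim_equal_group_ids_by_book_py : Prop := ∀ (rows : List (List (String × String))) (id_key : String), Dom_group_ids_by_book_py rows id_key → Pre_group_ids_by_book_py rows id_key → Spec_group_ids_by_book_py rows id_key (group_ids_by_book_py rows id_key)

-- ===== LEMMAS AND PROOFS =====

-- A's loop skips exactly the rows B filters out, and on kept rows performs the modify step.
theorem pv_foldl_filter (id_key : String) :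
    ∀ (l : List (List (String × String))) (d : PySem.Dict String (List String)),
      l.foldl
        (fun d r =>
          match (PySem.Dict.mk r).get? "book_id" with
          | none => d
          | some bid =>
            if bid = "" then d
            else d.modify bid [] (fun ids => ids ++ [((PySem.Dict.mk r).get? id_key).getD ""]))
        d
      = (l.filter (fun r => decide (pvBid r ≠ ""))).foldl
          (fun d r => d.modify (pvBid r) [] (fun ids => ids ++ [pvIdv r id_key])) d := by
  intro l
  induction l with
  | nil => intro d; rfl
  | cons r l ih =>
    intro d
    simp only [List.foldl_cons, List.filter_cons]
    cases h : (PySem.Dict.mk r).get? "book_id" with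
    | none =>
      have hb : pvBid r = "" := by simp [pvBid, h]
      simp [hb, ih]
    | some bid =>
      have hb : pvBid r = bid := by simp [pvBid, h]
      by_cases hbe : bid = ""
      · simp [hb, hbe, ih]
      · simp [hb, hbe, ih, pvIdv]

theorem group_ids_by_book_py_eq (rows : List (List (String × String))) (id_key : String) :
    group_ids_by_book_py rows id_key = group_ids_by_book_py_alt rows id_key := by
  unfold group_ids_by_book_py group_ids_by_book_py_alt
  rw [pv_foldl_filter]
  set kept := rows.filter (fun r => decide (pvBid r ≠ "")) with hkept
  have hmap :
      kept.foldl (fun d r => d.modify (pvBid r) [] (fun ids => ids ++ [pvIdv r id_key]))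
        (PySem.Dict.empty : PySem.Dict String (List String))
      = (kept.map (fun r => (pvBid r, pvIdv r id_key))).foldl
          (fun d p => d.modify p.1 [] (fun ids => ids ++ [p.2])) PySem.Dict.empty := by
    rw [List.foldl_map]
  rw [hmap]
  set l := kept.map (fun r => (pvBid r, pvIdv r id_key)) with hl
  set d := l.foldl (fun d p => d.modify p.1 [] (fun ids => ids ++ [p.2]))
    (PySem.Dict.empty : PySem.Dict String (List String)) with hd
  have hnd : d.keys.Nodup := by
    rw [hd]
    exact PySem.Dict.nodup_keys_foldl_modify_key l Prod.fst []
      (fun d p => fun ids => ids ++ [p.2]) PySem.Dict.empty PySem.Dict.nodup_keys_empty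
  have hkeys : d.keys = PySem.List.dedup (kept.map pvBid) := by
    rw [hd]
    rw [PySem.Dict.keys_foldl_modify_key]
    simp [hl, PySem.Dict.keys_empty, PySem.Set.update_nil_left, List.map_map,
      PySem.List.dedup_eq_ofList, Function.comp_def]
  rw [PySem.Dict.items_eq_map_keys d hnd [], hkeys]
  apply List.map_congr_left
  intro k _
  have hg : d.getD k [] = (l.filter (fun p => p.1 == k)).map (·.2) := by
    rw [hd, PySem.Dict.getD_foldl_modify_append]
    simp
  rw [hg, hl, List.filter_map, List.map_map]
  simp [Function.comp_def]

-- ===== VERDICT (by name: the statement is the Claim_ definition above) =====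
theorem group_ids_by_book_py_spec : Claim_equal_group_ids_by_book_py := by
  intro rows id_key _ _
  unfold Spec_group_ids_by_book_py
  exact group_ids_by_book_py_eq rows id_key
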